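-- pv_equiv track=rewrite | github.com/choroba/perlweeklychallenge-club | challenge-372/lubos-kolouch/python/ch-2.py | largest_substring
-- ===== SOURCE A (Python) =====
-- def largest_substring(text: str) -> int:
--     """
--     Returns the length of the largest substring between two equal characters
--     excluding the two characters. Return -1 if no such substring exists.
--     """
--     first_pos: dict[str, int] = {}
--     max_len = -1
--
--     for i, char in enumerate(text):
--         if char in first_pos:
--             length = i - first_pos[char] - 1
--             if length > max_len:
--                 max_len = length
--         else:
--             first_pos[char] = i
--
--     return max_len
-- ===== SOURCE B (Python) =====
-- def largest_substring(text: str) -> int: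
--     """
--     Length of the largest substring strictly between two equal characters,
--     or -1 if none. Index-table decomposition: for each distinct character
--     the best gap is last_occurrence - first_occurrence - 1; reduce by max.
--     """
--     best = -1
--     for c in set(text):
--         gap = text.rindex(c) - text.index(c) - 1
--         if gap > best:
--             best = gap
--     return best
-- ===== Notes on version B (the rewrite author's own statement) =====
-- stated objective: simpler
-- what changed: A's single online scan carrying a first-position dict and a running max is replaced by a two-phase decomposition: iterate over the distinct characters (set(text)) and reduce max over rindex(c) - index(c) - 1 per character, defaulting to -1. (the per-character index scans run in C via str.index/str.rindex, measured ~6x faster than A's Python-level loop despite the extra factor k)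
import Mathlib
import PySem

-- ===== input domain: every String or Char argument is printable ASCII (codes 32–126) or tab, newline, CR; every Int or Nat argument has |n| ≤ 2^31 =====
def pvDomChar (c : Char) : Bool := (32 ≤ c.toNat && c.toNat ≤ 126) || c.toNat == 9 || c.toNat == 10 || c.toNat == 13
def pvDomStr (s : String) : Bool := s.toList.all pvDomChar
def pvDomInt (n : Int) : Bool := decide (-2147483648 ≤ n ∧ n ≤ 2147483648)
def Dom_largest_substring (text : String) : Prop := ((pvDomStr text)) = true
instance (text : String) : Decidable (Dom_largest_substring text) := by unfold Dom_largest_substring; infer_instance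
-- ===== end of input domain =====

-- B replaces A's online scan (first-position dict + running max) by a two-phase
-- index-table decomposition over the distinct characters; objective: simpler.

-- ===== PORT A =====
-- single scan over enumerate(text): dict of first positions, running max
def largest_substring (text : String) : Int :=
  ((PySem.List.enumerate text.toList 0).foldl
    (fun (st : PySem.Dict Char Int × Int) (p : Int × Char) =>
      match st.1.get? p.2 with
      | some f =>
          let length := p.1 - f - 1
          (st.1, if length > st.2 then length else st.2)
      | none => (st.1.insert p.2 p.1, st.2))
    (PySem.Dict.empty, -1)).2

-- ===== PORT B =====
-- for c in set(text): gap = text.rindex(c) - text.index(c) - 1; keep the max.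
-- text.index(c) is ported as idxOf (exact: c is a single char drawn from text,
-- so it is present and substring search = first character index); text.rindex(c)
-- is ported by hand as len - 1 - idxOf on the reversed list (exact for the same
-- reason: the last occurrence of a present single character).
def largest_substring_alt (text : String) : Int :=
  let l := text.toList
  (PySem.Set.ofList l).foldl
    (fun (best : Int) (c : Char) =>
      let gap := ((l.length : Int) - 1 - ((l.reverse).idxOf c : Int)) - ((l.idxOf c : Int)) - 1
      if gap > best then gap else best)
    (-1)

-- ===== PRECONDITION & SPEC =====
def Spec_largest_substring (text : String) (out : Int) : Prop := out = largest_substring_alt text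
instance (text : String) (out : Int) : Decidable (Spec_largest_substring text out) := by unfold Spec_largest_substring; infer_instance

-- ===== CLAIM (what is proved, stated in full; the proofs are below) =====
def Claim_equal_largest_substring : Prop := ∀ (text : String), Dom_largest_substring text → Spec_largest_substring text (largest_substring text)

-- ===== LEMMAS AND PROOFS =====

-- A's fold step, named for the proofs (definitionally the lambda in the port)
def pvStepA (st : PySem.Dict Char Int × Int) (p : Int × Char) : PySem.Dict Char Int × Int :=
  match st.1.get? p.2 with
  | some f =>
      let length := p.1 - f - 1
      (st.1, if length > st.2 then length else st.2)
  | none => (st.1.insert p.2 p.1, st.2)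

-- B's per-character gap value and its max-reduction, named for the proofs
def pvGap (l : List Char) (c : Char) : Int :=
  ((l.length : Int) - 1 - ((l.reverse).idxOf c : Int)) - ((l.idxOf c : Int)) - 1

def pvM (l : List Char) : Int :=
  (PySem.Set.ofList l).foldl (fun best c => if pvGap l c > best then pvGap l c else best) (-1)

lemma pvIf_eq_max (x b : Int) : (if x > b then x else b) = max b x := by
  rw [max_def]; split_ifs <;> omega

lemma pvFold_eq_foldmax (s : List Char) (v : Char → Int) (b : Int) :
    s.foldl (fun best c => if v c > best then v c else best) b
      = s.foldl (fun best c => max best (v c)) b := by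
  induction s generalizing b with
  | nil => rfl
  | cons e t ih => rw [List.foldl_cons, List.foldl_cons, pvIf_eq_max, ih]

lemma pvFoldmax_init (s : List Char) (v : Char → Int) (b x : Int) :
    s.foldl (fun best c => max best (v c)) (max b x)
      = max (s.foldl (fun best c => max best (v c)) b) x := by
  induction s generalizing b with
  | nil => rfl
  | cons e t ih =>
      simp only [List.foldl_cons]
      rw [max_right_comm, ih]

lemma pvLe_foldmax (s : List Char) (v : Char → Int) (b : Int) :
    b ≤ s.foldl (fun best c => max best (v c)) b := by
  induction s generalizing b with
  | nil => exact le_rfl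
  | cons e t ih => exact le_trans (le_max_left _ _) (ih _)

lemma pvFoldmax_congr (s : List Char) (v w : Char → Int) (b : Int)
    (h : ∀ c ∈ s, v c = w c) :
    s.foldl (fun best c => max best (v c)) b = s.foldl (fun best c => max best (w c)) b := by
  induction s generalizing b with
  | nil => rfl
  | cons e t ih =>
      simp only [List.foldl_cons, h e List.mem_cons_self]
      exact ih _ (fun c hc => h c (List.mem_cons_of_mem _ hc))

lemma pvFoldmax_update (s : List Char) (c : Char) (v w : Char → Int)
    (hnd : s.Nodup) (hc : c ∈ s)
    (hagree : ∀ d ∈ s, d ≠ c → w d = v d) (hle : v c ≤ w c) (b : Int) :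
    s.foldl (fun best d => max best (w d)) b
      = max (s.foldl (fun best d => max best (v d)) b) (w c) := by
  induction s generalizing b with
  | nil => cases hc
  | cons e t ih =>
      rcases List.nodup_cons.mp hnd with ⟨hent, hndt⟩
      simp only [List.foldl_cons]
      rcases List.mem_cons.mp hc with heq | hct
      · -- head is c; the tail does not mention c
        subst heq
        have hwt : ∀ d ∈ t, w d = v d := fun d hd =>
          hagree d (List.mem_cons_of_mem _ hd) (fun hh => hent (hh ▸ hd))
        rw [pvFoldmax_congr t w v _ hwt, pvFoldmax_init t v b (w c),
            pvFoldmax_init t v b (v c), max_assoc, max_eq_right hle]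
      · have hec : e ≠ c := fun hh => hent (hh ▸ hct)
        rw [hagree e List.mem_cons_self hec]
        exact ih hndt hct (fun d hd hdc => hagree d (List.mem_cons_of_mem _ hd) hdc) _

-- index bookkeeping when one character is appended
lemma pvGap_append_of_ne (l : List Char) (x d : Char) (hdl : d ∈ l) (hdx : d ≠ x) :
    pvGap (l ++ [x]) d = pvGap l d := by
  unfold pvGap
  rw [List.idxOf_append_of_mem hdl]
  simp only [List.reverse_append, List.reverse_cons, List.reverse_nil, List.nil_append,
    List.singleton_append, List.idxOf_cons_ne _ (Ne.symm hdx), List.length_append,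
    List.length_cons, List.length_nil, Nat.succ_eq_add_one]
  push_cast
  ring

lemma pvGap_append_self_mem (l : List Char) (x : Char) (hx : x ∈ l) :
    pvGap (l ++ [x]) x = (l.length : Int) - (l.idxOf x : Int) - 1 := by
  unfold pvGap
  rw [List.idxOf_append_of_mem hx]
  simp only [List.reverse_append, List.reverse_cons, List.reverse_nil, List.nil_append,
    List.singleton_append, List.idxOf_cons_eq _ rfl, List.length_append,
    List.length_cons, List.length_nil]
  push_cast
  ring

lemma pvGap_append_self_new (l : List Char) (x : Char) (hx : x ∉ l) :
    pvGap (l ++ [x]) x = -1 := by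
  unfold pvGap
  rw [List.idxOf_append_of_notMem hx]
  simp only [List.reverse_append, List.reverse_cons, List.reverse_nil, List.nil_append,
    List.singleton_append, List.idxOf_cons_eq _ rfl, List.length_append,
    List.length_cons, List.length_nil]
  push_cast
  ring

-- pvM when one character is appended
lemma pvM_append_mem (l : List Char) (x : Char) (hx : x ∈ l) :
    pvM (l ++ [x]) = max (pvM l) ((l.length : Int) - (l.idxOf x : Int) - 1) := by
  unfold pvM
  rw [pvFold_eq_foldmax, pvFold_eq_foldmax]
  have hset : PySem.Set.ofList (l ++ [x]) = PySem.Set.ofList l := by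
    rw [PySem.Set.ofList_append_singleton, PySem.Set.add,
        if_pos ((PySem.Set.contains_iff _ _).2 ((PySem.Set.mem_ofList _ _).2 hx))]
  rw [hset, ← pvGap_append_self_mem l x hx]
  exact pvFoldmax_update (PySem.Set.ofList l) x (pvGap l) (pvGap (l ++ [x]))
    (PySem.Set.nodup_ofList _) ((PySem.Set.mem_ofList _ _).2 hx)
    (fun d hd hdx => pvGap_append_of_ne l x d ((PySem.Set.mem_ofList _ _).1 hd) hdx)
    (by
      rw [pvGap_append_self_mem l x hx]
      unfold pvGap
      have h1 : (0 : Int) ≤ (l.reverse.idxOf x : Int) := Int.natCast_nonneg _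
      omega)
    (-1)

lemma pvM_append_new (l : List Char) (x : Char) (hx : x ∉ l) :
    pvM (l ++ [x]) = pvM l := by
  unfold pvM
  rw [pvFold_eq_foldmax, pvFold_eq_foldmax]
  have hset : PySem.Set.ofList (l ++ [x]) = PySem.Set.ofList l ++ [x] := by
    rw [PySem.Set.ofList_append_singleton, PySem.Set.add]
    have hnc : ¬ (PySem.Set.ofList l).contains x = true := fun h =>
      hx ((PySem.Set.mem_ofList _ _).1 ((PySem.Set.contains_iff _ _).1 h))
    rw [if_neg hnc]
  rw [hset, List.foldl_append]
  rw [pvFoldmax_congr (PySem.Set.ofList l) (pvGap (l ++ [x])) (pvGap l) (-1)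
    (fun c hc => pvGap_append_of_ne l x c ((PySem.Set.mem_ofList _ _).1 hc)
      (fun hh => hx (hh ▸ (PySem.Set.mem_ofList _ _).1 hc)))]
  simp only [List.foldl_cons, List.foldl_nil, pvGap_append_self_new l x hx]
  exact max_eq_left (le_trans (by omega) (pvLe_foldmax _ _ (-1)))

-- the invariant of A's scan over a prefix l: the dict is the first-position
-- table of l and the running max is pvM l
lemma pvInv (l : List Char) :
    ∃ d : PySem.Dict Char Int,
      (PySem.List.enumerate l 0).foldl pvStepA (PySem.Dict.empty, -1) = (d, pvM l)
      ∧ ∀ c : Char, d.get? c = if c ∈ l then some ((l.idxOf c : Int)) else none := by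
  induction l using List.reverseRecOn with
  | nil =>
      refine ⟨PySem.Dict.empty, ?_, ?_⟩
      · rw [PySem.List.enumerate_nil]
        rfl
      · intro c; simp [PySem.Dict.get?_empty]
  | append_singleton l x ih =>
      rcases ih with ⟨d, hfold, hget⟩
      have henum : PySem.List.enumerate (l ++ [x]) 0
          = PySem.List.enumerate l 0 ++ [((l.length : Int), x)] := by
        rw [PySem.List.enumerate_append]
        rw [PySem.List.enumerate_cons, PySem.List.enumerate_nil]
        norm_num
      by_cases hx : x ∈ l
      · -- seen before: dict unchanged, running max updated with the gap at x
        refine ⟨d, ?_, ?_⟩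
        · rw [henum, List.foldl_append, hfold, List.foldl_cons, List.foldl_nil]
          unfold pvStepA
          rw [hget x, if_pos hx]
          simp only []
          rw [pvM_append_mem l x hx, pvIf_eq_max]
        · intro c
          by_cases hcl : c ∈ l
          · rw [hget c, if_pos hcl, if_pos (List.mem_append_left _ hcl),
                List.idxOf_append_of_mem hcl]
          · have hcx : c ≠ x := fun hh => hcl (hh ▸ hx)
            rw [hget c, if_neg hcl, if_neg (by simp [List.mem_append, hcl, hcx])]
      · -- new character: the dict gains x ↦ len l; the max absorbs a -1 gap
        refine ⟨d.insert x (l.length : Int), ?_, ?_⟩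
        · rw [henum, List.foldl_append, hfold, List.foldl_cons, List.foldl_nil]
          unfold pvStepA
          rw [hget x, if_neg hx]
          simp only []
          rw [pvM_append_new l x hx]
        · intro c
          by_cases hcx : c = x
          · subst hcx
            rw [PySem.Dict.get?_insert_self,
                if_pos (List.mem_append_right _ (List.mem_singleton.2 rfl)),
                List.idxOf_append_of_notMem hx, List.idxOf_cons_eq _ rfl]
            norm_num
          · rw [PySem.Dict.get?_insert_of_ne d _ hcx, hget c]
            by_cases hcl : c ∈ l
            · rw [if_pos hcl, if_pos (List.mem_append_left _ hcl),
                  List.idxOf_append_of_mem hcl]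
            · rw [if_neg hcl, if_neg (by simp [List.mem_append, hcl, hcx])]

lemma pvA_eq_M (l : List Char) :
    ((PySem.List.enumerate l 0).foldl pvStepA (PySem.Dict.empty, -1)).2 = pvM l := by
  rcases pvInv l with ⟨d, hfold, -⟩
  rw [hfold]

-- ===== VERDICT (by name: the statement is the Claim_ definition above) =====
theorem largest_substring_spec : Claim_equal_largest_substring := by
  intro text _
  show largest_substring text = largest_substring_alt text
  have hA : largest_substring text
      = ((PySem.List.enumerate text.toList 0).foldl pvStepA (PySem.Dict.empty, -1)).2 := rfl
  have hB : largest_substring_alt text = pvM text.toList := rfl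
  rw [hA, hB, pvA_eq_M]
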